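-- pv_equiv track=rewrite | github.com/harshit-vibes/bp-sdk | sdk/utils/sanitize.py | sanitize_node_data
-- ===== SOURCE A (Python) =====
-- ITERABLE_FIELDS = [
--     # Agent API fields
--     "managed_agents",  # List of managed worker agents
--     "a2a_tools",  # Agent-to-agent tools
--     "tool_configs",  # Tool configurations
--     "features",  # Enabled features (memory, KB, etc.)
--     # NOTE: "examples" is a STRING field, not array! Do not include here.
--     "tools",  # Simple tool list
--     "files",  # Attached files
--     "artifacts",  # Generated artifacts
--     "personas",  # Agent personas
--     "messages",  # Message history
--     # Blueprint API fields
--     "tags",  # Catalog tags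
--     "shared_with_users",  # User IDs for sharing
--     "shared_with_organizations",  # Org IDs for sharing
--     # Blueprint permission/sharing fields (PAGOS iterates these)
--     "user_ids",  # User IDs with access
--     "organization_ids",  # Org IDs with access
--     "permissions",  # Permission entries
--     "assets",  # Associated assets
-- ]
--
-- def sanitize_node_data(data: dict) -> dict:
--     """Sanitize node data (both agent and non-agent nodes).
--
--     Non-agent nodes (tool nodes, etc.) may also have iterable fields
--     that PAGOS iterates over during serialization.
--
--     Args:
--         data: Node data dict
--
--     Returns:
--         Sanitized node data
--     """
--     if not data:
--         return data
--
--     result = data.copy()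
--
--     # Sanitize all known iterable fields in node data
--     for field in ITERABLE_FIELDS:
--         if field in result and result[field] is None:
--             result[field] = []
--
--     return result
-- ===== SOURCE B (Python) =====
-- ITERABLE_SET = set([
--     "managed_agents", "a2a_tools", "tool_configs", "features",
--     "tools", "files", "artifacts", "personas", "messages",
--     "tags", "shared_with_users", "shared_with_organizations",
--     "user_ids", "organization_ids", "permissions", "assets",
-- ])
--
--
-- def sanitize_node_data(data: dict) -> dict:
--     """Sanitize node data: replace None values of known iterable fields by []."""
--     if not data:
--         return data
--     return {k: ([] if (k in ITERABLE_SET and v is None) else v)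
--             for k, v in data.items()}
-- ===== Notes on version B (the rewrite author's own statement) =====
-- stated objective: idiomatic
-- what changed: B makes one pass over the input dict's items with a set membership test, instead of A's loop over the fixed field list probing and mutating a copied dict; the result is built fresh by a dict comprehension.
import Mathlib
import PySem

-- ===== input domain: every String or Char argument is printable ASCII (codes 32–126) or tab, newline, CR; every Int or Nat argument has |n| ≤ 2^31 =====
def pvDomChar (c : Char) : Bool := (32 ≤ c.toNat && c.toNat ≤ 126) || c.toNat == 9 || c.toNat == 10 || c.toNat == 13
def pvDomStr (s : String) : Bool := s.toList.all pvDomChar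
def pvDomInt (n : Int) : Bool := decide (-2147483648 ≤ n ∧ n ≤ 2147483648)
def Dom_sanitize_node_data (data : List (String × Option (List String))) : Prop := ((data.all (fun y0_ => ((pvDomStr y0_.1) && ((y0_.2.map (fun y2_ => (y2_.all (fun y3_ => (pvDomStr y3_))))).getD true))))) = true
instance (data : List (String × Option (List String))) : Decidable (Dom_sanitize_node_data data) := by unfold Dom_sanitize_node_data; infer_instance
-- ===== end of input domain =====

-- B replaces A's loop over the fixed field list (probing and mutating a dict copy) by a
-- single pass over the input's own items with a set membership test (idiomatic, same cost).

-- ===== PORT A =====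
def ITERABLE_FIELDS : List String :=
  ["managed_agents", "a2a_tools", "tool_configs", "features",
   "tools", "files", "artifacts", "personas", "messages",
   "tags", "shared_with_users", "shared_with_organizations",
   "user_ids", "organization_ids", "permissions", "assets"]

def sanitize_node_data (data : List (String × Option (List String))) : List (String × Option (List String)) :=
  if data = [] then data
  else
    -- result = data.copy(); for field in ITERABLE_FIELDS: if field in result and result[field] is None: result[field] = []
    let result : PySem.Dict String (Option (List String)) := PySem.Dict.mk data
    (ITERABLE_FIELDS.foldl
      (fun r field => if r.get? field = some none then r.insert field (some []) else r)
      result).items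

-- ===== PORT B =====
def ITERABLE_SET : List String := PySem.Set.ofList ITERABLE_FIELDS

def sanitize_node_data_alt (data : List (String × Option (List String))) : List (String × Option (List String)) :=
  if data = [] then data
  else data.map (fun p => if p.1 ∈ ITERABLE_SET ∧ p.2 = none then (p.1, some []) else p)

-- ===== PRECONDITION & SPEC =====
-- Pre_ excludes association lists with duplicate keys, which do not represent any Python
-- dict input (a Python dict always has distinct keys).
def Pre_sanitize_node_data (data : List (String × Option (List String))) : Prop :=
  (data.map Prod.fst).Nodup
instance (data : List (String × Option (List String))) : Decidable (Pre_sanitize_node_data data) := by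
  unfold Pre_sanitize_node_data; infer_instance

def pvWitness_sanitize_node_data : (List (String × Option (List String))) :=
  [("tags", none), ("x", some ["a"]), ("messages", none)]

def Spec_sanitize_node_data (data : List (String × Option (List String))) (out : List (String × Option (List String))) : Prop := out = sanitize_node_data_alt data
instance (data : List (String × Option (List String))) (out : List (String × Option (List String))) : Decidable (Spec_sanitize_node_data data out) := by unfold Spec_sanitize_node_data; infer_instance

-- ===== CLAIM (what is proved, stated in full; the proofs are below) =====
def Claim_equal_sanitize_node_data : Prop := ∀ (data : List (String × Option (List String))), Dom_sanitize_node_data data → Pre_sanitize_node_data data → Spec_sanitize_node_data data (sanitize_node_data data)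

-- ===== LEMMAS AND PROOFS =====

-- A's field loop, run on a dict with distinct keys, rewrites exactly those items whose key
-- is in the field list and whose value is None — i.e. it is the per-item map of B.
lemma foldl_fields_items (fields : List String)
    (d : PySem.Dict String (Option (List String))) (hd : d.keys.Nodup) :
    (fields.foldl
      (fun r field => if r.get? field = some none then r.insert field (some []) else r)
      d).items
    = d.items.map (fun p => if p.1 ∈ fields ∧ p.2 = none then (p.1, some []) else p) := by
  induction fields generalizing d with
  | nil =>
    simp
  | cons f fields ih =>
    simp only [List.foldl_cons]
    by_cases hf : d.get? f = some none
    · have hc : d.contains f := by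
        simp [PySem.Dict.contains_eq_isSome_get?, hf]
      rw [if_pos hf, ih _ (by simpa using PySem.Dict.nodup_keys_insert d f (some []) hd),
        PySem.Dict.items_insert_of_contains _ _ hc, List.map_map]
      apply List.map_congr_left
      intro p hp
      by_cases hpf : p.1 = f
      · have hv : p.2 = none := by
          have := PySem.Dict.get?_of_mem_items (d := d) (k := p.1) (v := p.2) (by simpa using hp) hd
          rw [hpf, hf] at this
          exact (Option.some.injEq _ _ ▸ this).symm
        simp [Function.comp, hpf, hv]
      · simp [Function.comp, hpf]
    · rw [if_neg hf, ih _ hd]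
      apply List.map_congr_left
      intro p hp
      by_cases hpf : p.1 = f
      · have hv : p.2 ≠ none := by
          intro hn
          apply hf
          have := PySem.Dict.get?_of_mem_items (d := d) (k := p.1) (v := p.2) (by simpa using hp) hd
          rw [hpf, hn] at this
          exact this
        simp [hpf, hv]
      · simp [hpf]

-- ===== VERDICT (by name: the statement is the Claim_ definition above) =====
theorem sanitize_node_data_spec : Claim_equal_sanitize_node_data := by
  intro data _ hpre
  unfold Spec_sanitize_node_data sanitize_node_data sanitize_node_data_alt
  by_cases h : data = []
  · simp [h]
  · rw [if_neg h, if_neg h]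
    have hkeys : (PySem.Dict.mk data).keys.Nodup := by
      simpa [PySem.Dict.keys] using hpre
    rw [foldl_fields_items ITERABLE_FIELDS (PySem.Dict.mk data) hkeys]
    apply List.map_congr_left
    intro p _
    have : (p.1 ∈ ITERABLE_FIELDS) ↔ (p.1 ∈ ITERABLE_SET) := by
      unfold ITERABLE_SET
      exact (PySem.Set.mem_ofList _ _).symm
    simp only [this]
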